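-- pv_equiv track=rewrite | github.com/JaeHyeok-Han/Algorithm | PROGRAMMERS/과일 장수.py | solution
-- ===== SOURCE A (Python) =====
-- def solution(k, m, score):
--     answer = 0
--     score.sort()
--     while len(score) >= m:
--         for i in range(m - 1):
--             score.pop()
--         s = score.pop()
--         answer += (s * m)
--     return answer
-- ===== SOURCE B (Python) =====
-- def solution(k, m, score):
--     answer = 0
--     filled = 0
--     for v in sorted(score, reverse=True):
--         filled += 1
--         if filled % m == 0:
--             answer += v * m
--     return answer
-- ===== Notes on version B (the rewrite author's own statement) =====
-- stated objective: simpler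
-- what changed: A destructively sorts ascending and repeatedly pops chunks of m from the end of the list; B makes one non-destructive pass over the descending sort with a running 'filled' counter, adding v*m whenever a box of m is completed, and does not mutate the input.
import Mathlib
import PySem

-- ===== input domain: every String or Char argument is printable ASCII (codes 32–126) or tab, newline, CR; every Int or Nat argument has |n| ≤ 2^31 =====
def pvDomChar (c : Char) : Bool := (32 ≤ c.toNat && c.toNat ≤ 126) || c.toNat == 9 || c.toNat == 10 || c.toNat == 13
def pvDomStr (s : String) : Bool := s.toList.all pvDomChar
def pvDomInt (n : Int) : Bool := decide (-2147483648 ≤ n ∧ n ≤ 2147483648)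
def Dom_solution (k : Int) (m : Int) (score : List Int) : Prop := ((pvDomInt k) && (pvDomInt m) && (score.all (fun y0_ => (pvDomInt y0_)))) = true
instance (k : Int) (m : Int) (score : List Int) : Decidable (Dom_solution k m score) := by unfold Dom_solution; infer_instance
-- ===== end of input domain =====

-- B replaces A's destructive sort-and-pop-in-chunks loop by one non-destructive pass over the
-- descending sort with a running counter (objective: simpler). NOTE: Python A mutates `score`
-- in place (sorts and pops it empty); B does not — the equivalence proved here is about the
-- RETURN value only.

-- ===== PORT A =====
-- score.pop() (last element); Python raises IndexError on []: the .getD default is only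
-- reached outside Pre_solution (m ≤ 0), where Python A raises / loops.
def popA (xs : List Int) : Int × List Int := (PySem.List.pop? xs).getD (0, [])

-- 'for i in range(m - 1): score.pop()'
def popNA : Nat → List Int → List Int
  | 0, xs => xs
  | n + 1, xs => popNA n (popA xs).2

-- the 'while len(score) >= m' loop; fuel = initial length + 1 only makes it total
-- (for m ≥ 1 it is never exhausted; for m ≤ 0 Python raises/diverges, outside Pre_)
def loopA (m : Int) : Nat → List Int → Int → Int
  | 0, _, answer => answer
  | fuel + 1, sc, answer =>
    if m ≤ PySem.List.len sc then
      let sc1 := popNA (m - 1).toNat sc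
      let p := popA sc1
      loopA m fuel p.2 (answer + p.1 * m)
    else answer

def solution (k : Int) (m : Int) (score : List Int) : Int :=
  loopA m (score.length + 1) (PySem.List.sorted score (fun x => x) false) 0

-- ===== PORT B =====
-- loop body: filled += 1; if filled % m == 0: answer += v * m
def stepB (m : Int) (st : Int × Int) (v : Int) : Int × Int :=
  let filled := st.2 + 1
  if PySem.Int.mod filled m = 0 then (st.1 + v * m, filled) else (st.1, filled)

def solution_alt (k : Int) (m : Int) (score : List Int) : Int :=
  ((PySem.List.sorted score (fun x => x) true).foldl (stepB m) (0, 0)).1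

-- ===== PRECONDITION & SPEC =====
-- Pre_ excludes exactly m ≤ 0, on which Python A never returns (it pops an empty list:
-- IndexError); no input on which A returns is excluded.
def Pre_solution (k : Int) (m : Int) (score : List Int) : Prop := 1 ≤ m
instance (k : Int) (m : Int) (score : List Int) : Decidable (Pre_solution k m score) := by unfold Pre_solution; infer_instance
def pvWitness_solution : Int × Int × List Int := (0, 1, [1])

def Spec_solution (k : Int) (m : Int) (score : List Int) (out : Int) : Prop := out = solution_alt k m score
instance (k : Int) (m : Int) (score : List Int) (out : Int) : Decidable (Spec_solution k m score out) := by unfold Spec_solution; infer_instance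

-- ===== CLAIM (what is proved, stated in full; the proofs are below) =====
def Claim_equal_solution : Prop := ∀ (k : Int) (m : Int) (score : List Int), Dom_solution k m score → Pre_solution k m score → Spec_solution k m score (solution k m score)

-- ===== LEMMAS AND PROOFS =====

lemma popA_concat (xs : List Int) (x : Int) : popA (xs ++ [x]) = (x, xs) := by
  simp [popA, PySem.List.pop?_last]

lemma popA_snd (xs : List Int) : (popA xs).2 = xs.dropLast := by
  rcases List.eq_nil_or_concat xs with h | ⟨ys, y, h⟩ <;> subst h
  · simp [popA, PySem.List.pop?]
  · simp [popA_concat]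

lemma popNA_take : ∀ (n : Nat) (xs : List Int), popNA n xs = xs.take (xs.length - n) := by
  intro n
  induction n with
  | zero => intro xs; simp [popNA]
  | succ n ih =>
    intro xs
    rw [popNA, popA_snd, ih, List.dropLast_eq_take, List.take_take, List.length_take]
    congr 1
    omega

lemma foldB_off (m : Int) : ∀ (d : List Int) (a f : Int),
    (d.foldl (stepB m) (a, f)).1 = a + (d.foldl (stepB m) (0, f)).1 := by
  intro d
  induction d with
  | nil => intro a f; simp
  | cons v d ih =>
    intro a f
    simp only [List.foldl_cons, stepB]
    split
    · rw [ih (a + v * m), ih (0 + v * m)]; ring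
    · exact ih a (f + 1)

lemma foldB_shift (m : Int) (hm : 0 < m) : ∀ (d : List Int) (f1 f2 : Int), f1 % m = f2 % m →
    (d.foldl (stepB m) (0, f1)).1 = (d.foldl (stepB m) (0, f2)).1 := by
  intro d
  induction d with
  | nil => intro f1 f2 _; simp
  | cons v d ih =>
    intro f1 f2 h
    have h1 : (f1 + 1) % m = (f2 + 1) % m := by
      rw [Int.add_emod, h, ← Int.add_emod]
    simp only [List.foldl_cons, stepB, PySem.Int.mod_eq_emod_of_pos hm]
    by_cases hc : (f1 + 1) % m = 0
    · rw [if_pos hc, if_pos (h1 ▸ hc)]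
      rw [foldB_off m d (0 + v * m) (f1 + 1), foldB_off m d (0 + v * m) (f2 + 1), ih _ _ h1]
    · rw [if_neg hc, if_neg (fun hx => hc (h1 ▸ hx))]
      exact ih _ _ h1

lemma foldB_small (m : Int) (hm : 0 < m) : ∀ (d : List Int) (a f : Int), 0 ≤ f →
    f + d.length < m → d.foldl (stepB m) (a, f) = (a, f + d.length) := by
  intro d
  induction d with
  | nil => intro a f _ _; simp
  | cons v d ih =>
    intro a f hf hlt
    simp only [List.length_cons] at hlt
    have hne : PySem.Int.mod (f + 1) m ≠ 0 := by
      rw [PySem.Int.mod_eq_emod_of_pos hm, Int.emod_eq_of_lt (by omega) (by push_cast at hlt ⊢; omega)]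
      omega
    simp only [List.foldl_cons, stepB, if_neg hne]
    rw [ih a (f + 1) (by omega) (by push_cast at hlt ⊢; omega)]
    simp only [List.length_cons, Prod.mk.injEq]
    exact ⟨by trivial, by push_cast; ring⟩

lemma foldB_chunk (m : Int) (hm : 0 < m) : ∀ (h : List Int) (a f : Int), h ≠ [] → 0 ≤ f →
    f + h.length = m → h.foldl (stepB m) (a, f) = (a + (h.getLast?.getD 0) * m, m) := by
  intro h
  induction h with
  | nil => intro a f hne _ _; exact absurd rfl hne
  | cons v h ih =>
    intro a f _ hf heq
    cases h with
    | nil =>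
      simp only [List.length_cons, List.length_nil] at heq
      have : f + 1 = m := by push_cast at heq; omega
      simp only [List.foldl_cons, stepB, this, List.foldl_nil]
      rw [if_pos (by rw [PySem.Int.mod_eq_emod_of_pos hm, Int.emod_self])]
      simp
    | cons w h' =>
      simp only [List.length_cons] at heq
      have hne : PySem.Int.mod (f + 1) m ≠ 0 := by
        rw [PySem.Int.mod_eq_emod_of_pos hm, Int.emod_eq_of_lt (by omega) (by push_cast at heq ⊢; omega)]
        omega
      have hstep : stepB m (a, f) v = (a, f + 1) := by
        simp only [stepB]; rw [if_neg hne]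
      rw [List.foldl_cons, hstep, ih a (f + 1) (by simp) (by omega) (by simp only [List.length_cons] at heq ⊢; push_cast at heq ⊢; omega)]
      simp [List.getLast?_cons_cons]

lemma loopA_eq (m : Int) (hm : 0 < m) : ∀ (fuel : Nat) (t : List Int) (ans : Int),
    t.length ≤ fuel →
    loopA m fuel t ans = ans + (t.reverse.foldl (stepB m) (0, 0)).1 := by
  intro fuel
  induction fuel with
  | zero =>
    intro t ans hle
    have : t = [] := List.eq_nil_of_length_eq_zero (by omega)
    subst this
    simp [loopA]
  | succ fuel ih =>
    intro t ans hle
    rw [loopA]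
    by_cases hc : m ≤ PySem.List.len t
    · rw [if_pos hc]
      rw [PySem.List.len_eq] at hc
      set L := t.length with hL
      have hmt : (1 : Nat) ≤ m.toNat ∧ m.toNat ≤ L := by omega
      have hm1 : (m - 1).toNat = m.toNat - 1 := by omega
      -- sc1 = u ++ [head of w]
      have hsc1 : popNA (m - 1).toNat t = t.take (L - (m.toNat - 1)) := by
        rw [popNA_take, hm1]
      set u := t.take (L - m.toNat) with hu
      set w := t.drop (L - m.toNat) with hw
      have hlenw : w.length = m.toNat := by
        rw [hw, List.length_drop]; omega
      obtain ⟨whd, wtl, hwc⟩ : ∃ a l, w = a :: l := by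
        cases hww : w with
        | nil => rw [hww] at hlenw; simp at hlenw; omega
        | cons a l => exact ⟨a, l, rfl⟩
      have htake1 : t.take (L - (m.toNat - 1)) = u ++ [whd] := by
        have : L - (m.toNat - 1) = (L - m.toNat) + 1 := by omega
        rw [this, List.take_add, ← hu, ← hw, hwc]
        rfl
      simp only [hsc1, htake1, popA_concat]
      have hulen : u.length = L - m.toNat := by rw [hu, List.length_take]; omega
      rw [ih u (ans + whd * m) (by omega)]
      -- RHS
      have htrev : t.reverse = w.reverse ++ u.reverse := by
        rw [← List.reverse_append, List.take_append_drop]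
      rw [htrev, List.foldl_append]
      have hchunk : w.reverse.foldl (stepB m) ((0 : Int), (0 : Int))
          = (whd * m, m) := by
        rw [foldB_chunk m hm _ _ _ (by simp [hwc]) le_rfl
          (by rw [List.length_reverse, hlenw]; omega)]
        rw [List.getLast?_reverse, hwc]
        simp
      rw [hchunk, foldB_off m _ (whd * m) m,
        foldB_shift m hm u.reverse m 0 (by rw [Int.emod_self, Int.zero_emod])]
      ring
    · rw [if_neg hc]
      rw [PySem.List.len_eq] at hc
      rw [foldB_small m hm t.reverse 0 0 le_rfl (by rw [List.length_reverse]; omega)]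
      simp

lemma sorted_desc_eq_reverse (xs : List Int) :
    PySem.List.sorted xs (fun x => x) true = (PySem.List.sorted xs (fun x => x) false).reverse := by
  have h : (PySem.List.sorted xs (fun x => x) true).reverse
      = PySem.List.sorted xs (fun x => x) false := by
    apply PySem.List.eq_of_perm_of_pairwise_le_of_injective (fun x => x) (fun a b h => h)
    · exact ((List.reverse_perm _).trans (PySem.List.sorted_perm xs (fun x => x) true)).trans
        (PySem.List.sorted_perm xs (fun x => x) false).symm
    · rw [List.pairwise_reverse]
      exact PySem.List.sorted_pairwise_rev xs (fun x => x)
    · exact PySem.List.sorted_pairwise xs (fun x => x)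
  rw [← h, List.reverse_reverse]

-- ===== VERDICT (by name: the statement is the Claim_ definition above) =====
theorem solution_spec : Claim_equal_solution := by
  intro k m score _ hpre
  unfold Spec_solution solution solution_alt
  have hm : 0 < m := hpre
  rw [loopA_eq m hm _ _ 0 (by simp [PySem.List.length_sorted]),
    sorted_desc_eq_reverse]
  simp
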